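-- pv_equiv track=rewrite | github.com/schn27/aoc2024 | 15.py | get_moving_boxes_b
-- ===== SOURCE A (Python) =====
-- def get_moving_boxes_b(walls, boxes, xy, dxdy):
--     if xy in walls:
--         return None
--
--     if dxdy[0] != 0:
--         xy = xy if dxdy[0] > 0 else (xy[0] - 1, xy[1])
--         if xy not in boxes:
--             return []
--         moving = get_moving_boxes_b(walls, boxes, (xy[0] + (-1 if dxdy[0] == -1 else 2), xy[1]), dxdy)
--         return None if moving is None else [xy] + moving
--     else:
--         xy2 = (xy[0] - 1, xy[1])
--         if xy not in boxes and xy2 not in boxes: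
--             return []
--         if xy not in boxes:
--             xy = xy2
--
--         moving1 = get_moving_boxes_b(walls, boxes, (xy[0], xy[1] + dxdy[1]), dxdy)
--         moving2 = get_moving_boxes_b(walls, boxes, (xy[0] + 1, xy[1] + dxdy[1]), dxdy)
--         return None if moving1 is None or moving2 is None else [xy] + moving1 + moving2
-- ===== SOURCE B (Python) =====
-- def get_moving_boxes_b(walls, boxes, xy, dxdy):
--     result = []
--     stack = [xy]
--     while stack:
--         x, y = stack.pop()
--         if (x, y) in walls:
--             return None
--         if dxdy[0] != 0:
--             if dxdy[0] <= 0: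
--                 x -= 1
--             if (x, y) not in boxes:
--                 continue
--             result.append((x, y))
--             stack.append((x + (-1 if dxdy[0] == -1 else 2), y))
--         else:
--             if (x, y) not in boxes:
--                 if (x - 1, y) not in boxes:
--                     continue
--                 x -= 1
--             result.append((x, y))
--             stack.append((x + 1, y + dxdy[1]))
--             stack.append((x, y + dxdy[1]))
--     return result
-- ===== Notes on version B (the rewrite author's own statement) =====
-- stated objective: alternative
-- what changed: Replaces A's recursion with an explicit-stack iterative preorder DFS that appends each confirmed box to a single result list instead of concatenating sublists on the way back up.
import Mathlib
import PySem

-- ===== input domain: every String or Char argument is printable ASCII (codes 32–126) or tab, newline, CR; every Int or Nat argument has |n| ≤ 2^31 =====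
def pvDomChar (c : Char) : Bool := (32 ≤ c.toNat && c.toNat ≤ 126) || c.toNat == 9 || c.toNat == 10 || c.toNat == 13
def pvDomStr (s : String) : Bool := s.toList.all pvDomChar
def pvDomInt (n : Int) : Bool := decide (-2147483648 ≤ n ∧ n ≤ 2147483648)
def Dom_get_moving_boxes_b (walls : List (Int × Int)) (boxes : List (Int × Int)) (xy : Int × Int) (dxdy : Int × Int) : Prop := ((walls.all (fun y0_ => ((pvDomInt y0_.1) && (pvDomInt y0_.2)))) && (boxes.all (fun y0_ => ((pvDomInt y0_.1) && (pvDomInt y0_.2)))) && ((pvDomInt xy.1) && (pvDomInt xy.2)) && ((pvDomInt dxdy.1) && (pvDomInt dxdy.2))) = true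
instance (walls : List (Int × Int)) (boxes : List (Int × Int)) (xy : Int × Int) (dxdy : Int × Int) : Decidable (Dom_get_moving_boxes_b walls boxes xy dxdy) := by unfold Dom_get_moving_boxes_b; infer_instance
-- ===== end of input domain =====

-- B replaces A's recursion by an explicit-stack iterative preorder DFS that appends each
-- confirmed box to a result list (objective: alternative decomposition; same values, same order).
-- Both ports are fuelled (fuel boxes.length + 2, a pure totality guard; A's recursion depth is
-- bounded by boxes.length + 1 on every input where the Python returns, since the scanned
-- coordinate is strictly monotone and each internal level needs a distinct box).

-- ===== PORT A =====
-- literal transliteration of A's recursion; the Nat is fuel (totality guard only)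
def goA (walls boxes : List (Int × Int)) (dxdy : Int × Int) : Nat → Int × Int → Option (List (Int × Int))
  | 0, _ => none
  | fuel + 1, xy =>
    if xy ∈ walls then none
    else if dxdy.1 ≠ 0 then
      let xy1 := if dxdy.1 > 0 then xy else (xy.1 - 1, xy.2)
      if xy1 ∉ boxes then some []
      else
        match goA walls boxes dxdy fuel (xy1.1 + (if dxdy.1 = -1 then -1 else 2), xy1.2) with
        | none => none
        | some moving => some (xy1 :: moving)
    else
      let xy2 := (xy.1 - 1, xy.2)
      if xy ∉ boxes ∧ xy2 ∉ boxes then some []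
      else
        let xy1 := if xy ∉ boxes then xy2 else xy
        match goA walls boxes dxdy fuel (xy1.1, xy1.2 + dxdy.2),
              goA walls boxes dxdy fuel (xy1.1 + 1, xy1.2 + dxdy.2) with
        | some m1, some m2 => some (xy1 :: (m1 ++ m2))
        | _, _ => none

def get_moving_boxes_b (walls : List (Int × Int)) (boxes : List (Int × Int)) (xy : Int × Int) (dxdy : Int × Int) : Option (List (Int × Int)) :=
  goA walls boxes dxdy (boxes.length + 2) xy

-- ===== PORT B =====
-- Source B's while-loop over an explicit stack; each frame carries a depth budget (totality guard)
def loopB (walls boxes : List (Int × Int)) (dxdy : Int × Int) :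
    List ((Int × Int) × Nat) → List (Int × Int) → Option (List (Int × Int))
  | [], result => some result
  | (_, 0) :: _, _ => none
  | (xy, d + 1) :: rest, result =>
    if xy ∈ walls then none
    else if dxdy.1 ≠ 0 then
      let x := if dxdy.1 ≤ 0 then xy.1 - 1 else xy.1
      if (x, xy.2) ∉ boxes then loopB walls boxes dxdy rest result
      else loopB walls boxes dxdy (((x + (if dxdy.1 = -1 then -1 else 2), xy.2), d) :: rest)
             (result ++ [(x, xy.2)])
    else
      if xy ∉ boxes ∧ (xy.1 - 1, xy.2) ∉ boxes then loopB walls boxes dxdy rest result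
      else
        let x := if xy ∈ boxes then xy.1 else xy.1 - 1
        loopB walls boxes dxdy
          (((x, xy.2 + dxdy.2), d) :: ((x + 1, xy.2 + dxdy.2), d) :: rest)
          (result ++ [(x, xy.2)])
  termination_by stack _ => (stack.map (fun f => 3 ^ f.2)).sum
  decreasing_by
  · simp only [List.map_cons, List.sum_cons]
    have h1 : 1 ≤ 3 ^ (d + 1) := Nat.one_le_pow _ _ (by norm_num)
    omega
  · simp only [List.map_cons, List.sum_cons, pow_succ]
    have h1 : 1 ≤ 3 ^ d := Nat.one_le_pow _ _ (by norm_num)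
    omega
  · simp only [List.map_cons, List.sum_cons]
    have h1 : 1 ≤ 3 ^ (d + 1) := Nat.one_le_pow _ _ (by norm_num)
    omega
  · simp only [List.map_cons, List.sum_cons, pow_succ]
    have h1 : 1 ≤ 3 ^ d := Nat.one_le_pow _ _ (by norm_num)
    omega

def get_moving_boxes_b_alt (walls : List (Int × Int)) (boxes : List (Int × Int)) (xy : Int × Int) (dxdy : Int × Int) : Option (List (Int × Int)) :=
  loopB walls boxes dxdy [(xy, boxes.length + 2)] []

-- ===== PRECONDITION & SPEC =====
-- Pre_ excludes exactly the inputs on which A recurses forever and raises RecursionError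
-- (dxdy = (0,0), xy not a wall, and a box at xy or immediately to its left); B loops forever there too.
def Pre_get_moving_boxes_b (walls : List (Int × Int)) (boxes : List (Int × Int)) (xy : Int × Int) (dxdy : Int × Int) : Prop :=
  dxdy ≠ (0, 0) ∨ xy ∈ walls ∨ (xy ∉ boxes ∧ (xy.1 - 1, xy.2) ∉ boxes)
instance (walls : List (Int × Int)) (boxes : List (Int × Int)) (xy : Int × Int) (dxdy : Int × Int) : Decidable (Pre_get_moving_boxes_b walls boxes xy dxdy) := by unfold Pre_get_moving_boxes_b; infer_instance

def pvWitness_get_moving_boxes_b : (List (Int × Int)) × (List (Int × Int)) × (Int × Int) × (Int × Int) :=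
  ([(2, 0)], [(0, 0), (1, 0)], (0, 0), (1, 0))

def Spec_get_moving_boxes_b (walls : List (Int × Int)) (boxes : List (Int × Int)) (xy : Int × Int) (dxdy : Int × Int) (out : Option (List (Int × Int))) : Prop := out = get_moving_boxes_b_alt walls boxes xy dxdy
instance (walls : List (Int × Int)) (boxes : List (Int × Int)) (xy : Int × Int) (dxdy : Int × Int) (out : Option (List (Int × Int))) : Decidable (Spec_get_moving_boxes_b walls boxes xy dxdy out) := by unfold Spec_get_moving_boxes_b; infer_instance

-- ===== CLAIM (what is proved, stated in full; the proofs are below) =====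
def Claim_equal_get_moving_boxes_b : Prop := ∀ (walls : List (Int × Int)) (boxes : List (Int × Int)) (xy : Int × Int) (dxdy : Int × Int), Dom_get_moving_boxes_b walls boxes xy dxdy → Pre_get_moving_boxes_b walls boxes xy dxdy → Spec_get_moving_boxes_b walls boxes xy dxdy (get_moving_boxes_b walls boxes xy dxdy)

-- ===== LEMMAS AND PROOFS =====

-- processing a frame (xy, d) runs A's recursion at fuel d and appends its yield to the accumulator
theorem loopB_frame (walls boxes : List (Int × Int)) (dxdy : Int × Int) :
    ∀ (d : Nat) (xy : Int × Int) (rest : List ((Int × Int) × Nat)) (acc : List (Int × Int)),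
      loopB walls boxes dxdy ((xy, d) :: rest) acc =
        match goA walls boxes dxdy d xy with
        | none => none
        | some m => loopB walls boxes dxdy rest (acc ++ m) := by
  intro d
  induction d with
  | zero => intro xy rest acc; simp [loopB, goA]
  | succ d ih =>
    intro xy rest acc
    rw [loopB, goA]
    by_cases hw : xy ∈ walls
    · simp [hw]
    · simp only [hw, if_false]
      by_cases hdx : dxdy.1 ≠ 0
      · simp only [if_pos hdx]
        have hnorm : (if dxdy.1 > 0 then xy else (xy.1 - 1, xy.2)) =
            ((if dxdy.1 ≤ 0 then xy.1 - 1 else xy.1), xy.2) := by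
          split_ifs with h1 h2
          · omega
          · rfl
          · rfl
          · omega
        rw [hnorm]
        by_cases hb : ((if dxdy.1 ≤ 0 then xy.1 - 1 else xy.1), xy.2) ∈ boxes
        · simp only [hb, not_true]
          rw [ih]
          cases goA walls boxes dxdy d ((if dxdy.1 ≤ 0 then xy.1 - 1 else xy.1) + (if dxdy.1 = -1 then -1 else 2), xy.2) with
          | none => rfl
          | some m => simp
        · simp [hb]
      · simp only [hdx, if_false]
        by_cases he : xy ∉ boxes ∧ (xy.1 - 1, xy.2) ∉ boxes
        · simp [he]
        · simp only [if_neg he]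
          have hnorm : (if xy ∉ boxes then ((xy.1 - 1, xy.2) : Int × Int) else xy) =
              ((if xy ∈ boxes then xy.1 else xy.1 - 1), xy.2) := by
            by_cases hxb : xy ∈ boxes <;> simp [hxb]
          rw [hnorm]
          rw [ih]
          cases goA walls boxes dxdy d ((if xy ∈ boxes then xy.1 else xy.1 - 1), xy.2 + dxdy.2) with
          | none => rfl
          | some m1 =>
            dsimp only
            rw [ih]
            cases goA walls boxes dxdy d ((if xy ∈ boxes then xy.1 else xy.1 - 1) + 1, xy.2 + dxdy.2) with
            | none => rfl
            | some m2 => simp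

-- ===== VERDICT (by name: the statement is the Claim_ definition above) =====
theorem get_moving_boxes_b_spec : Claim_equal_get_moving_boxes_b := by
  intro walls boxes xy dxdy _ _
  unfold Spec_get_moving_boxes_b get_moving_boxes_b get_moving_boxes_b_alt
  rw [loopB_frame]
  cases goA walls boxes dxdy (boxes.length + 2) xy with
  | none => rfl
  | some m => simp [loopB]
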